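-- pv_equiv track=rewrite | github.com/pypi-data/pypi-mirror-322 | packages/milmapcon/milmapcon-1.0.2-py3-none-any.whl/milmapcon/milmapcon.py | parse_gridsquare
-- ===== SOURCE A (Python) =====
-- def parse_gridsquare(grid_square: str) -> tuple[str, str, int, int]:
--     '''
--     Parses grid square and ensures the data is in the correct format.
--     Returns "None" values if grid doesn't exist in the selected zone
--     or if the numeric reference is invalid
--
--     Parameters:
--         grid_square (str): raw input of grid reference
--
--     Returns:
--         grid_letters (str): Two-letter grid reference
--         clean_grid (str): Clean grid_square reference with proper capitalization and
--                             without whitespace or special characters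
--         x_m (int): Relative Easting derived from the first half of the grid reference
--         y_m (int): Relative Northing derived from the second half of the grid reference
--     '''
--
--     grid_letters = ''
--     grid_numbers = ''
--
--     # trims whitespace regarless of its position in the input
--     # enforces proper grid letter capitalization
--
--     for character in str(grid_square):
--         if (character.isalpha()) & (len(grid_letters) == 0):
--             grid_letters += character.lower()
--         elif (character.isalpha()) & (len(grid_letters) == 1):
--             grid_letters += character.upper()
--         elif character.isdigit():
--             grid_numbers += character
--
--     clean_grid = grid_letters + grid_numbers
--     x_m = y_m = 0
--
--     # checks the precision of the grid reference to calculate the magnitude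
--     # correctly
--
--     if len(grid_numbers) == 4:
--         x_m += (int(grid_numbers[0:2]) * 1000)
--         y_m += (int(grid_numbers[2:]) * 1000)
--     elif len(grid_numbers) == 6:
--         x_m += (int(grid_numbers[0:3]) * 100)
--         y_m += (int(grid_numbers[3:]) * 100)
--     else:
--         x_m = y_m = None
--
--     return grid_letters, clean_grid, x_m, y_m
-- ===== SOURCE B (Python) =====
-- def parse_gridsquare(grid_square: str) -> tuple[str, str, int, int]:
--     s = str(grid_square)
--     letters = ''.join(c for c in s if c.isalpha())
--     digits = ''.join(c for c in s if c.isdigit())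
--     # branch-free letter assembly: empty slices make the 0/1-letter cases fall out
--     grid_letters = letters[:1].lower() + letters[1:2].upper()
--     half, rem = divmod(len(digits), 2)
--     if rem == 0 and half in (2, 3):
--         scale = 10 ** (5 - half)
--         x_m = int(digits[:half]) * scale
--         y_m = int(digits[half:]) * scale
--     else:
--         x_m = y_m = None
--     return grid_letters, grid_letters + digits, x_m, y_m
-- ===== Notes on version B (the rewrite author's own statement) =====
-- stated objective: simpler
-- what changed: Replaces A's single stateful casing loop (keyed on len(grid_letters)) and its two duplicated 4/6-digit branches by branch-free slice-based assembly of the letter prefix (letters[:1].lower()+letters[1:2].upper()) and one unified precision formula half,rem=divmod(len(digits),2), scale=10**(5-half), so the early-return chain becomes an arithmetical formulation.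
import Mathlib
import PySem

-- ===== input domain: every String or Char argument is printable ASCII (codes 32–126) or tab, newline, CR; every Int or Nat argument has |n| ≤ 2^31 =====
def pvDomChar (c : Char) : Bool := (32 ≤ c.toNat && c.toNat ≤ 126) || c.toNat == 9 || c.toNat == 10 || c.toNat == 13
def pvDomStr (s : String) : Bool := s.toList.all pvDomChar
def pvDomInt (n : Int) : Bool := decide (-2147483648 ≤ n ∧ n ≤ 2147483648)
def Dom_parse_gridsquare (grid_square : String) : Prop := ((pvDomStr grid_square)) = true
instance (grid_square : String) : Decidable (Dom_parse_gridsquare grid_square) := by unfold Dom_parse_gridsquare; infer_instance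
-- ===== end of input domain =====

-- B replaces A's single stateful casing loop and duplicated 4/6-digit branches by
-- branch-free slice-based letter assembly and one unified divmod/power precision
-- formula; objective: simpler.


-- ===== PORT A =====
-- the for-loop of A: state = (grid_letters, grid_numbers), branches in A's order
def pgLoopA : List Char → List Char × List Char → List Char × List Char
  | [], st => st
  | c :: rest, (ls, ns) =>
      if PySem.Chars.isalpha c && ls.length == 0 then
        pgLoopA rest (ls ++ [PySem.Chars.lowerChar c], ns)
      else if PySem.Chars.isalpha c && ls.length == 1 then
        pgLoopA rest (ls ++ [PySem.Chars.upperChar c], ns)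
      else if PySem.Chars.isdigit c then
        pgLoopA rest (ls, ns ++ [c])
      else
        pgLoopA rest (ls, ns)

def parse_gridsquare (grid_square : String) : String × String × Option Int × Option Int :=
  let st := pgLoopA grid_square.toList ([], [])
  let grid_letters := st.1
  let grid_numbers := st.2
  let clean_grid := grid_letters ++ grid_numbers
  -- x_m = y_m = 0 then '+=' of int(...)·scale; int() cannot fail on digit strings, the
  -- Option.map keeps the port total where Python would raise ValueError (it never does here)
  if grid_numbers.length == 4 then
    (String.ofList grid_letters, String.ofList clean_grid,
     (PySem.Int.ofChars? (PySem.List.slice grid_numbers none (some 2))).map (fun v => 0 + v * 1000),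
     (PySem.Int.ofChars? (PySem.List.slice grid_numbers (some 2) none)).map (fun v => 0 + v * 1000))
  else if grid_numbers.length == 6 then
    (String.ofList grid_letters, String.ofList clean_grid,
     (PySem.Int.ofChars? (PySem.List.slice grid_numbers none (some 3))).map (fun v => 0 + v * 100),
     (PySem.Int.ofChars? (PySem.List.slice grid_numbers (some 3) none)).map (fun v => 0 + v * 100))
  else
    (String.ofList grid_letters, String.ofList clean_grid, none, none)

-- ===== PORT B =====
def parse_gridsquare_alt (grid_square : String) : String × String × Option Int × Option Int :=
  let s := grid_square.toList
  let letters := s.filter PySem.Chars.isalpha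
  let digits := s.filter PySem.Chars.isdigit
  -- letters[:1].lower() + letters[1:2].upper() : branch-free, empty slices absorb the 0/1-letter cases
  let grid_letters :=
    PySem.Chars.lower (PySem.List.slice letters none (some 1)) ++
    PySem.Chars.upper (PySem.List.slice letters (some 1) (some 2))
  -- half, rem = divmod(len(digits), 2); // and % on a nonnegative int, divisor 2 never raises
  let half : Int := PySem.Int.floordiv (digits.length : Int) 2
  let rem  : Int := PySem.Int.mod (digits.length : Int) 2
  if rem == 0 && (half == 2 || half == 3) then
    -- scale = 10 ** (5 - half); here half ∈ {2, 3} so 5 - half is a positive exponent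
    let scale : Int := (10 : Int) ^ ((5 - half).toNat)
    (String.ofList grid_letters, String.ofList (grid_letters ++ digits),
     (PySem.Int.ofChars? (PySem.List.slice digits none (some half))).map (· * scale),
     (PySem.Int.ofChars? (PySem.List.slice digits (some half) none)).map (· * scale))
  else
    (String.ofList grid_letters, String.ofList (grid_letters ++ digits), none, none)

-- ===== PRECONDITION & SPEC =====
def Spec_parse_gridsquare (grid_square : String) (out : String × String × Option Int × Option Int) : Prop := out = parse_gridsquare_alt grid_square
instance (grid_square : String) (out : String × String × Option Int × Option Int) : Decidable (Spec_parse_gridsquare grid_square out) := by unfold Spec_parse_gridsquare; infer_instance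

-- ===== CLAIM (what is proved, stated in full; the proofs are below) =====
def Claim_equal_parse_gridsquare : Prop := ∀ (grid_square : String), Dom_parse_gridsquare grid_square → Spec_parse_gridsquare grid_square (parse_gridsquare grid_square)

-- ===== LEMMAS AND PROOFS =====

-- ASCII letters are not digits
theorem pg_alpha_not_digit (c : Char) (h : PySem.Chars.isalpha c = true) :
    PySem.Chars.isdigit c = false := by
  unfold PySem.Chars.isalpha PySem.Chars.isdigit PySem.Chars.isupper PySem.Chars.islower at *
  simp [Char.le_def, UInt32.le_iff_toNat_le] at *
  omega

-- the letters A's loop appends once `n` letters are already collected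
def pgTakeLetters : Nat → List Char → List Char
  | 0, [] => []
  | 0, a :: as => PySem.Chars.lowerChar a :: pgTakeLetters 1 as
  | 1, [] => []
  | 1, a :: _ => [PySem.Chars.upperChar a]
  | _+2, _ => []

theorem pgLoopA_spec (cs : List Char) : ∀ (ls ns : List Char),
    pgLoopA cs (ls, ns) =
      (ls ++ pgTakeLetters ls.length (cs.filter PySem.Chars.isalpha),
       ns ++ cs.filter PySem.Chars.isdigit) := by
  induction cs with
  | nil => intro ls ns; cases ls with
    | nil => simp [pgLoopA, pgTakeLetters]
    | cons a t => cases t <;> simp [pgLoopA, pgTakeLetters]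
  | cons c rest ih =>
    intro ls ns
    by_cases ha : PySem.Chars.isalpha c = true
    · have hd := pg_alpha_not_digit c ha
      match ls with
      | [] => simp [pgLoopA, ha, hd, ih, pgTakeLetters]
      | [a] => simp [pgLoopA, ha, hd, ih, pgTakeLetters]
      | a :: b :: t => simp [pgLoopA, ha, hd, ih, pgTakeLetters]
    · have ha' : PySem.Chars.isalpha c = false := by simpa using ha
      by_cases hd : PySem.Chars.isdigit c = true
      · simp [pgLoopA, ha', hd, ih]
      · have hd' : PySem.Chars.isdigit c = false := by simpa using hd
        simp [pgLoopA, ha', hd', ih]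

-- A's cased two-letter prefix coincides with B's slice-based assembly
theorem pg_letters_eq (letters : List Char) :
    pgTakeLetters 0 letters =
      PySem.Chars.lower (PySem.List.slice letters none (some 1)) ++
      PySem.Chars.upper (PySem.List.slice letters (some 1) (some 2)) := by
  match letters with
  | [] => rfl
  | [a] => rfl
  | a :: b :: t =>
    simp [pgTakeLetters, PySem.List.slice, PySem.Chars.lower, PySem.Chars.upper,
      List.take, List.drop]

-- a length that is even with half 2 or 3 is exactly 4 or 6
theorem pg_no46 (n : Nat) (h4 : n ≠ 4) (h6 : n ≠ 6) (hdvd : ((n:Int)).fmod 2 = 0)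
    (h : ((n:Int)).fdiv 2 = 2 ∨ ((n:Int)).fdiv 2 = 3) : True ≠ True := by
  rw [Int.fmod_eq_emod] at hdvd
  rw [Int.fdiv_eq_ediv] at h
  simp at hdvd h
  rcases h with h | h <;> omega

-- ===== VERDICT (by name: the statement is the Claim_ definition above) =====
theorem parse_gridsquare_spec : Claim_equal_parse_gridsquare := by
  intro s _
  unfold Spec_parse_gridsquare parse_gridsquare parse_gridsquare_alt
  rw [pgLoopA_spec]
  simp only [List.length_nil, List.nil_append, pg_letters_eq]
  set ds := s.toList.filter PySem.Chars.isdigit with hds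
  by_cases h4 : ds.length = 4
  · simp [h4, PySem.Int.floordiv, PySem.Int.mod]
  · by_cases h6 : ds.length = 6
    · simp [h6, PySem.Int.floordiv, PySem.Int.mod]
    · simp [h4, h6, PySem.Int.floordiv, PySem.Int.mod]
      intro hdvd hor
      exact absurd rfl (pg_no46 ds.length h4 h6 hdvd hor)
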